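-- pv_equiv track=rewrite | github.com/finejian/wip-case | notes_tools.py | firstFromAndDate
-- ===== SOURCE A (Python) =====
-- __to = "To:"
--
-- __cc = "Cc:"
--
-- __from = "From:"
--
-- __Date = "Date:"
--
-- __finance = "SDC Finance WIP Transfer"
--
-- def firstFromAndDate(line, dateLines):
--     fr, fd = "", ""
--     if (line.startswith(__to) or line.startswith(__cc)) and line.find(__finance) > 0:
--         for l in dateLines:
--             if l.startswith(__from):
--                 frs = l.replace(__from, "").strip().replace("CN=", "").split("/")
--                 if len(frs) > 0:
--                     fr = frs[0]
--             if l.startswith(__Date):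
--                 fd = l.replace(__Date, "").strip()
--     return fr, fd
-- ===== SOURCE B (Python) =====
-- __to = "To:"
-- __cc = "Cc:"
-- __from = "From:"
-- __Date = "Date:"
-- __finance = "SDC Finance WIP Transfer"
--
-- def firstFromAndDate(line, dateLines):
--     fr, fd = "", ""
--     if (line.startswith(__to) or line.startswith(__cc)) and line.find(__finance) > 0:
--         for l in reversed(dateLines):
--             if l.startswith(__from):
--                 fr = l.replace(__from, "").strip().replace("CN=", "").split("/")[0]
--                 break
--         for l in reversed(dateLines):
--             if l.startswith(__Date):
--                 fd = l.replace(__Date, "").strip()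
--                 break
--     return fr, fd
-- ===== Notes on version B (the rewrite author's own statement) =====
-- stated objective: alternative
-- what changed: Replaces A's single forward loop that keeps overwriting fr/fd with two independent backward scans that each stop at the first (i.e. last) matching header line; the always-true len(frs)>0 guard disappears since split with a non-empty separator is never empty.
import Mathlib
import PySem

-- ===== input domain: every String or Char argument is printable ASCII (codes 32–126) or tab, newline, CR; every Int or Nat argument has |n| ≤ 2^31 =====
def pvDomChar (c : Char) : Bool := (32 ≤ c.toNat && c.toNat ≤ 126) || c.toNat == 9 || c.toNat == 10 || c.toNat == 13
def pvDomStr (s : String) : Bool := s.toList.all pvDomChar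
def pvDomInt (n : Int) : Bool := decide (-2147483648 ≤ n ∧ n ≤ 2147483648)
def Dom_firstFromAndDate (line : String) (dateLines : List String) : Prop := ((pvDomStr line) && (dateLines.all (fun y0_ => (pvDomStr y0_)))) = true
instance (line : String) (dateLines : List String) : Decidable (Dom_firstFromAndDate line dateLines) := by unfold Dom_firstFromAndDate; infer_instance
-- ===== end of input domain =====

-- B replaces A's forward overwrite loop by two independent backward early-exit scans; alternative decomposition, same cost.

-- ===== PORT A =====
def firstFromAndDate (line : String) (dateLines : List String) : String × String :=
  let init : String × String := ("", "")
  if (PySem.Str.startswith line "To:" || PySem.Str.startswith line "Cc:")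
      && decide (0 < PySem.Str.find line "SDC Finance WIP Transfer") then
    dateLines.foldl (fun (st : String × String) l =>
      let st :=
        if PySem.Str.startswith l "From:" then
          let frs := (PySem.Str.split? (PySem.Str.replace (PySem.Str.strip (PySem.Str.replace l "From:" "")) "CN=" "") "/").getD []
          if 0 < frs.length then (frs.headD st.1, st.2) else st
        else st
      if PySem.Str.startswith l "Date:" then (st.1, PySem.Str.strip (PySem.Str.replace l "Date:" "")) else st)
      init
  else init

-- ===== PORT B =====
-- backward scan: first line (of the reversed list) starting with "From:", processed; "" if none
def pvLastFromName : List String → String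
  | [] => ""
  | l :: rest =>
    if PySem.Str.startswith l "From:" then
      ((PySem.Str.split? (PySem.Str.replace (PySem.Str.strip (PySem.Str.replace l "From:" "")) "CN=" "") "/").getD []).headD ""
    else pvLastFromName rest

-- backward scan: first line (of the reversed list) starting with "Date:", stripped; "" if none
def pvLastDate : List String → String
  | [] => ""
  | l :: rest =>
    if PySem.Str.startswith l "Date:" then PySem.Str.strip (PySem.Str.replace l "Date:" "")
    else pvLastDate rest

def firstFromAndDate_alt (line : String) (dateLines : List String) : String × String :=
  if (PySem.Str.startswith line "To:" || PySem.Str.startswith line "Cc:")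
      && decide (0 < PySem.Str.find line "SDC Finance WIP Transfer") then
    (pvLastFromName dateLines.reverse, pvLastDate dateLines.reverse)
  else ("", "")

-- ===== PRECONDITION & SPEC =====
def Spec_firstFromAndDate (line : String) (dateLines : List String) (out : String × String) : Prop := out = firstFromAndDate_alt line dateLines
instance (line : String) (dateLines : List String) (out : String × String) : Decidable (Spec_firstFromAndDate line dateLines out) := by unfold Spec_firstFromAndDate; infer_instance

-- ===== CLAIM (what is proved, stated in full; the proofs are below) =====
def Claim_equal_firstFromAndDate : Prop := ∀ (line : String) (dateLines : List String), Dom_firstFromAndDate line dateLines → Spec_firstFromAndDate line dateLines (firstFromAndDate line dateLines)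

-- ===== LEMMAS AND PROOFS =====

-- the processed "From:" value of one line (the expression both ports share)
def pvProcFrom (l : String) : String :=
  ((PySem.Str.split? (PySem.Str.replace (PySem.Str.strip (PySem.Str.replace l "From:" "")) "CN=" "") "/").getD []).headD ""

def pvProcDate (l : String) : String := PySem.Str.strip (PySem.Str.replace l "Date:" "")

-- scan-with-default versions used to run the induction
def pvScanFrom : List String → String → String
  | [], d => d
  | l :: rest, d => if PySem.Str.startswith l "From:" then pvProcFrom l else pvScanFrom rest d

def pvScanDate : List String → String → String
  | [], d => d
  | l :: rest, d => if PySem.Str.startswith l "Date:" then pvProcDate l else pvScanDate rest d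

theorem pvSplitOn_go_ne_nil (sep : List Char) (fuel : Nat) (l cur : List Char) (acc : List (List Char)) :
    PySem.Chars.splitOn.go sep fuel l cur acc ≠ [] := by
  induction fuel generalizing l cur acc with
  | zero => simp [PySem.Chars.splitOn.go]
  | succ n ih =>
    cases l with
    | nil => simp [PySem.Chars.splitOn.go]
    | cons c rest =>
      rw [PySem.Chars.splitOn.go]
      split
      · exact ih _ _ _
      · exact ih _ _ _

theorem pvSplit_slash_ne_nil (s : String) :
    (PySem.Str.split? s "/").getD [] ≠ [] := by
  have h : PySem.Chars.splitOn s.toList "/".toList ≠ [] := by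
    rw [PySem.Chars.splitOn]; exact pvSplitOn_go_ne_nil _ _ _ _ _
  simp [PySem.Str.split?, PySem.Chars.split?]
  intro hc
  exact h (by simp [hc])

theorem pvStepState_eq (fr fd : String) (l : String) :
    (let st :=
        if PySem.Str.startswith l "From:" then
          let frs := (PySem.Str.split? (PySem.Str.replace (PySem.Str.strip (PySem.Str.replace l "From:" "")) "CN=" "") "/").getD []
          if 0 < frs.length then (frs.headD (fr, fd).1, (fr, fd).2) else (fr, fd)
        else (fr, fd)
      if PySem.Str.startswith l "Date:" then (st.1, PySem.Str.strip (PySem.Str.replace l "Date:" "")) else st)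
    = (if PySem.Str.startswith l "From:" then pvProcFrom l else fr,
       if PySem.Str.startswith l "Date:" then pvProcDate l else fd) := by
  obtain ⟨x, xs', hx⟩ := List.exists_cons_of_ne_nil
    (pvSplit_slash_ne_nil (PySem.Str.replace (PySem.Str.strip (PySem.Str.replace l "From:" "")) "CN=" ""))
  by_cases hf : PySem.Chars.startswith l.toList ['F', 'r', 'o', 'm', ':'] = true <;>
    by_cases hd : PySem.Chars.startswith l.toList ['D', 'a', 't', 'e', ':'] = true <;>
      simp [hf, hd, hx, pvProcFrom, pvProcDate]

theorem pvScanFrom_append (ys : List String) (l : String) (d : String) :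
    pvScanFrom (ys ++ [l]) d
      = pvScanFrom ys (if PySem.Str.startswith l "From:" then pvProcFrom l else d) := by
  induction ys with
  | nil => rfl
  | cons y r ih => simp [pvScanFrom, ih]

theorem pvScanDate_append (ys : List String) (l : String) (d : String) :
    pvScanDate (ys ++ [l]) d
      = pvScanDate ys (if PySem.Str.startswith l "Date:" then pvProcDate l else d) := by
  induction ys with
  | nil => rfl
  | cons y r ih => simp [pvScanDate, ih]

theorem pvLastFromName_eq_scan (xs : List String) : pvLastFromName xs = pvScanFrom xs "" := by
  induction xs with
  | nil => rfl
  | cons l r ih => simp [pvLastFromName, pvScanFrom, pvProcFrom, ih]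

theorem pvLastDate_eq_scan (xs : List String) : pvLastDate xs = pvScanDate xs "" := by
  induction xs with
  | nil => rfl
  | cons l r ih => simp [pvLastDate, pvScanDate, pvProcDate, ih]

theorem pvFold_eq_scan (xs : List String) (fr fd : String) :
    xs.foldl (fun (st : String × String) l =>
      let st :=
        if PySem.Str.startswith l "From:" then
          let frs := (PySem.Str.split? (PySem.Str.replace (PySem.Str.strip (PySem.Str.replace l "From:" "")) "CN=" "") "/").getD []
          if 0 < frs.length then (frs.headD st.1, st.2) else st
        else st
      if PySem.Str.startswith l "Date:" then (st.1, PySem.Str.strip (PySem.Str.replace l "Date:" "")) else st)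
      (fr, fd)
      = (pvScanFrom xs.reverse fr, pvScanDate xs.reverse fd) := by
  induction xs generalizing fr fd with
  | nil => rfl
  | cons l r ih =>
    rw [List.reverse_cons, pvScanFrom_append, pvScanDate_append, List.foldl_cons,
      pvStepState_eq fr fd l]
    exact ih _ _

-- ===== VERDICT (by name: the statement is the Claim_ definition above) =====
theorem firstFromAndDate_spec : Claim_equal_firstFromAndDate := by
  intro line dateLines _
  unfold Spec_firstFromAndDate firstFromAndDate firstFromAndDate_alt
  by_cases h : ((PySem.Str.startswith line "To:" || PySem.Str.startswith line "Cc:")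
      && decide (0 < PySem.Str.find line "SDC Finance WIP Transfer")) = true
  · simp only [h, if_pos]
    rw [pvFold_eq_scan, pvLastFromName_eq_scan, pvLastDate_eq_scan]
  · simp only [if_neg h]
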